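-- pv_equiv track=rewrite | github.com/mohemish9/text_gen | markov text genrator.py | dollarify
-- ===== SOURCE A (Python) =====
-- PUNCTUATION = [".", "!", "?"]
--
-- def dollarify(wordList, k):
--     """ dollarify takes adds a given nubmer of "$" sings in the begining of each sentence in a given list of words
--         input: wordlist, a list of words
--                k, number of dollar signs desired to be added at the begining of each sentence
--         output: a list of words with k dollar signs at the begining of each sentence
--     """
--     output=[]
--     sentence=[]
--     for x in range(len(wordList)):
--         sentence = sentence + [wordList[x]]
--         for y in range(len(wordList[x])):
--             if wordList[x][y] in PUNCTUATION:
--                 output = output + ["$"] *k + sentence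
--                 sentence=[]
--     return output
-- ===== SOURCE B (Python) =====
-- PUNCTUATION = [".", "!", "?"]
--
-- def dollarify(wordList, k):
--     """Prefix every sentence with k '$' signs; a sentence ends at each
--     punctuation mark, so first locate all terminators, then cut the word
--     list into sentences at those positions."""
--     terminators = [i for i, w in enumerate(wordList) for ch in w if ch in PUNCTUATION]
--     output = []
--     prev = -1
--     for i in terminators:
--         output += ["$"] * k + wordList[prev + 1 : i + 1]
--         prev = i
--     return output
-- ===== Notes on version B (the rewrite author's own statement) =====
-- stated objective: faster
-- what changed: B does two separated phases over different data: it first computes the list of terminator word-indices (one index per punctuation occurrence, via an enumerate comprehension) and then assembles the output by slicing wordList between consecutive terminator indices with in-place extends, instead of A's single streaming pass that buffers a sentence list and rebuilds output by full concatenation at every flush inside a per-character scan.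
import Mathlib
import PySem

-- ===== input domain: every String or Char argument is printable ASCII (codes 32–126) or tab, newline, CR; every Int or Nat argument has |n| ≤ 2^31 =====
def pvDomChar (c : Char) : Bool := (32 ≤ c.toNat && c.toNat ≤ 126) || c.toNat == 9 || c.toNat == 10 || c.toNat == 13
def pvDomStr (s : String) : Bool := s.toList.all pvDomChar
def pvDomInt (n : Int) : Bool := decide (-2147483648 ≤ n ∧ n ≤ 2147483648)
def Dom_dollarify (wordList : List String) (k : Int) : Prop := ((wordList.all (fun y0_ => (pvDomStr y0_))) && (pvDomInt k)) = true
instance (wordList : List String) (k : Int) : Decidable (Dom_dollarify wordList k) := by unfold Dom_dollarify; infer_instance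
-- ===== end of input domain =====

-- B locates all sentence terminators first (one index per punctuation mark), then assembles the output by slicing the word list between consecutive terminators, instead of A's streaming buffer that flushes inside a per-character scan; objective: alternative decomposition.


-- PUNCTUATION = [".", "!", "?"]  (module constant, shared context)
def pvPunct : List Char := ['.', '!', '?']

-- ===== PORT A =====
-- A: for each word append it to sentence, then scan its characters; each punctuation
-- character flushes output := output ++ ["$"]*k ++ sentence and resets sentence.
def dollarify (wordList : List String) (k : Int) : List String :=
  (wordList.foldl
    (fun (st : List String × List String) w =>
      let st := (st.1, st.2 ++ [w])
      w.toList.foldl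
        (fun (st : List String × List String) c =>
          if c ∈ pvPunct then (st.1 ++ PySem.List.pyRepeat ["$"] k ++ st.2, [])
          else st)
        st)
    ([], [])).1

-- ===== PORT B =====
-- B: first collect the word index of every punctuation occurrence (the sentence
-- terminators), then for each terminator emit ["$"]*k followed by the slice of
-- wordList from just after the previous terminator through the current word.
def dollarify_alt (wordList : List String) (k : Int) : List String :=
  let terminators :=
    (PySem.List.enumerate wordList).flatMap
      (fun p => (p.2.toList.filter (fun ch => ch ∈ pvPunct)).map (fun _ => p.1))
  (terminators.foldl
    (fun (st : List String × Int) i =>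
      (st.1 ++ PySem.List.pyRepeat ["$"] k ++
        PySem.List.slice wordList (some (st.2 + 1)) (some (i + 1)), i))
    ([], -1)).1

-- ===== PRECONDITION & SPEC =====
def Spec_dollarify (wordList : List String) (k : Int) (out : List String) : Prop := out = dollarify_alt wordList k
instance (wordList : List String) (k : Int) (out : List String) : Decidable (Spec_dollarify wordList k out) := by unfold Spec_dollarify; infer_instance

-- ===== CLAIM (what is proved, stated in full; the proofs are below) =====
def Claim_equal_dollarify : Prop := ∀ (wordList : List String) (k : Int), Dom_dollarify wordList k → Spec_dollarify wordList k (dollarify wordList k)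

-- ===== LEMMAS AND PROOFS =====

-- n copies of D, appended left to right as A's flush loop produces them
def pvDollars (D : List String) (n : Nat) : List String :=
  (List.range n).foldl (fun o _ => o ++ D) []

theorem pvDollars_step (D : List String) (n : Nat) :
    pvDollars D (n + 1) = pvDollars D n ++ D := by
  unfold pvDollars
  rw [List.range_succ, List.foldl_append]
  simp

theorem pvRangeFold (D : List String) (n : Nat) (x : List String) :
    (List.range n).foldl (fun o _ => o ++ D) x = x ++ pvDollars D n := by
  induction n with
  | zero => simp [pvDollars]
  | succ m ih =>
      rw [List.range_succ, List.foldl_append, pvDollars_step]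
      simp [ih]

theorem pvDollars_succ (D : List String) (n : Nat) :
    pvDollars D (n + 1) = D ++ pvDollars D n := by
  induction n with
  | zero => simp [pvDollars, List.range_succ]
  | succ m ih =>
      have h3 : pvDollars D m ++ D = D ++ pvDollars D m := by
        rw [← pvDollars_step, ih]
      rw [pvDollars_step, pvDollars_step, h3]
      simp [List.append_assoc, h3]

-- common reference: the sentence-flushing recursion both programs compute
def pvSpec (D : List String) : List String → List String → List String
  | [], _ => []
  | w :: ws, sent =>
      let c := (w.toList.filter (fun ch => ch ∈ pvPunct)).length
      if 1 ≤ c then D ++ sent ++ [w] ++ pvDollars D (c - 1) ++ pvSpec D ws []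
      else pvSpec D ws (sent ++ [w])

-- A's inner character scan, characterised by the punctuation count of the word
theorem pvInnerA (D : List String) (cs : List Char) (out sent : List String) :
    cs.foldl
      (fun (st : List String × List String) c =>
        if c ∈ pvPunct then (st.1 ++ D ++ st.2, []) else st)
      (out, sent)
    = (if 1 ≤ (cs.filter (fun ch => ch ∈ pvPunct)).length then
        ((List.range ((cs.filter (fun ch => ch ∈ pvPunct)).length - 1)).foldl
          (fun o _ => o ++ D) (out ++ D ++ sent), [])
      else (out, sent)) := by
  induction cs generalizing out sent with
  | nil => simp
  | cons c rest ih =>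
      by_cases hc : c ∈ pvPunct
      · simp only [List.foldl_cons, List.filter_cons, hc, if_pos, decide_true,
          List.length_cons]
        rw [ih]
        set m := (List.filter (fun ch => decide (ch ∈ pvPunct)) rest).length with hmdef
        rw [if_pos (by omega : 1 ≤ m + 1)]
        simp only [Nat.add_sub_cancel]
        by_cases h1 : 1 ≤ m
        · rw [if_pos h1]
          obtain ⟨t, ht⟩ : ∃ t, m = t + 1 := ⟨m - 1, by omega⟩
          rw [ht]
          simp only [Nat.add_sub_cancel, List.append_nil]
          rw [pvRangeFold, pvRangeFold, pvDollars_succ]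
          simp
        · rw [if_neg h1]
          have hm0 : m = 0 := by omega
          rw [hm0]
          simp
      · simp only [List.foldl_cons, List.filter_cons, hc, decide_false,
          Bool.false_eq_true, if_false]
        exact ih out sent

-- A's fold computes pvSpec
theorem pvA_eq (k : Int) (ws : List String) (out sent : List String) :
    (ws.foldl
      (fun (st : List String × List String) w =>
        let st := (st.1, st.2 ++ [w])
        w.toList.foldl
          (fun (st : List String × List String) c =>
            if c ∈ pvPunct then (st.1 ++ PySem.List.pyRepeat ["$"] k ++ st.2, [])
            else st)
          st)
      (out, sent)).1
    = out ++ pvSpec (PySem.List.pyRepeat ["$"] k) ws sent := by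
  induction ws generalizing out sent with
  | nil => simp [pvSpec]
  | cons w ws ih =>
      set D := PySem.List.pyRepeat ["$"] k with hD
      simp only [List.foldl_cons]
      rw [pvInnerA D w.toList out (sent ++ [w])]
      set c := (w.toList.filter (fun ch => ch ∈ pvPunct)).length with hc
      by_cases h1 : 1 ≤ c
      · rw [if_pos h1]
        rw [pvRangeFold]
        rw [ih]
        simp [pvSpec, ← hc, if_pos h1]
      · rw [if_neg h1]
        rw [ih]
        simp [pvSpec, ← hc, if_neg h1]

-- the terminator indices of (w :: ws), enumerated from s
theorem pvTerm_cons (s : Int) (w : String) (ws : List String) :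
    (PySem.List.enumerate (w :: ws) s).flatMap
        (fun p => (p.2.toList.filter (fun ch => ch ∈ pvPunct)).map (fun _ => p.1))
      = List.replicate (w.toList.filter (fun ch => ch ∈ pvPunct)).length s ++
        (PySem.List.enumerate ws (s + 1)).flatMap
          (fun p => (p.2.toList.filter (fun ch => ch ∈ pvPunct)).map (fun _ => p.1)) := by
  rw [PySem.List.enumerate_cons]
  simp [List.map_const']

-- B's step over repeated terminators at the current position only appends D
theorem pvRepFold (D : List String) (full : List String) (m : Nat) (i : Nat) (x : List String) :
    (List.replicate m (i : Int)).foldl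
      (fun (st : List String × Int) j =>
        (st.1 ++ D ++ PySem.List.slice full (some (st.2 + 1)) (some (j + 1)), j))
      (x, (i : Int))
    = (x ++ pvDollars D m, (i : Int)) := by
  induction m generalizing x with
  | zero => simp [pvDollars]
  | succ m ih =>
      rw [List.replicate_succ, List.foldl_cons]
      have hsl : PySem.List.slice full (some ((i : Int) + 1)) (some ((i : Int) + 1)) = [] := by
        have : ((i : Int) + 1) = ((i + 1 : Nat) : Int) := by push_cast; ring
        rw [this, PySem.List.slice_natCast]
        simp
      rw [hsl]
      rw [ih]
      rw [pvDollars_succ]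
      simp

-- B's fold over the remaining terminators computes pvSpec; the processed prefix is
-- 'done', the unflushed buffer 'sent', and prev = done.length - 1.
theorem pvB_main (D : List String) (ws : List String) :
    ∀ (done sent out : List String),
    ((((PySem.List.enumerate ws ((done.length + sent.length : Nat) : Int)).flatMap
        (fun p => (p.2.toList.filter (fun ch => ch ∈ pvPunct)).map (fun _ => p.1))).foldl
      (fun (st : List String × Int) i =>
        (st.1 ++ D ++ PySem.List.slice (done ++ sent ++ ws) (some (st.2 + 1)) (some (i + 1)), i))
      (out, (done.length : Int) - 1))).1
    = out ++ pvSpec D ws sent := by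
  induction ws with
  | nil => intro done sent out; simp [PySem.List.enumerate_nil, pvSpec]
  | cons w ws ih =>
      intro done sent out
      rw [pvTerm_cons]
      set c := (w.toList.filter (fun ch => ch ∈ pvPunct)).length with hc
      rw [List.foldl_append]
      by_cases h1 : 1 ≤ c
      · -- first terminator flushes sent ++ [w]; the rest append D only; then recurse
        obtain ⟨c', hc'⟩ : ∃ c', c = c' + 1 := ⟨c - 1, by omega⟩
        rw [hc', List.replicate_succ, List.foldl_cons]
        have hprev : (done.length : Int) - 1 + 1 = ((done.length : Nat) : Int) := by ring
        have hstop : ((done.length + sent.length : Nat) : Int) + 1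
            = ((done.length + sent.length + 1 : Nat) : Int) := by push_cast; ring
        have hsl : PySem.List.slice (done ++ sent ++ w :: ws)
            (some ((done.length : Int) - 1 + 1))
            (some (((done.length + sent.length : Nat) : Int) + 1)) = sent ++ [w] := by
          rw [hprev, hstop, PySem.List.slice_natCast]
          rw [List.append_assoc, List.drop_left]
          have hn : done.length + sent.length + 1 - done.length = sent.length + 1 := by omega
          rw [hn]
          have : sent ++ [w] ++ ws = sent ++ w :: ws := by simp
          rw [← this, List.take_append_of_le_length (by simp)]
          simp
        rw [hsl]
        rw [pvRepFold]
        have hfull : done ++ sent ++ w :: ws = (done ++ sent ++ [w]) ++ ([] : List String) ++ ws := by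
          simp
        have hlen : ((done ++ sent ++ [w]).length : Int) - 1
            = ((done.length + sent.length : Nat) : Int) := by
          simp; ring
        have hstart : (((done ++ sent ++ [w]).length + ([] : List String).length : Nat) : Int)
            = ((done.length + sent.length : Nat) : Int) + 1 := by
          simp; ring
        rw [hfull, ← hstart, ← hlen]
        rw [ih (done ++ sent ++ [w]) [] _]
        simp only [pvSpec, ← hc, hc']
        simp [pvDollars]
      · -- no terminator in w: it joins the buffer
        have hc0 : c = 0 := by omega
        rw [hc0, List.replicate_zero, List.foldl_nil]
        have hfull : done ++ sent ++ w :: ws = done ++ (sent ++ [w]) ++ ws := by simp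
        have hstart : ((done.length + sent.length : Nat) : Int) + 1
            = ((done.length + (sent ++ [w]).length : Nat) : Int) := by
          simp; ring
        rw [hfull, hstart]
        rw [ih done (sent ++ [w]) out]
        simp only [pvSpec, ← hc, hc0]
        simp

-- ===== VERDICT (by name: the statement is the Claim_ definition above) =====
theorem dollarify_spec : Claim_equal_dollarify := by
  intro wordList k _
  unfold Spec_dollarify dollarify dollarify_alt
  rw [pvA_eq]
  have h := pvB_main (PySem.List.pyRepeat ["$"] k) wordList [] [] []
  simp only [List.length_nil, List.nil_append] at h
  simp only [List.nil_append]
  rw [← h]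
  norm_num
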